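-- pv_equiv track=rewrite | github.com/junrui-liu/coding-problems | kickstart/19_a.py | bfs
-- ===== SOURCE A (Python) =====
-- def bfs(offices, R, C):
--   from itertools import product
--   distances = [[None for c in range(C)] for r in range(R)]
--   max_dist = 0
--   l1, l2 = offices, []
--   dist = 0
--   while True:
--     for r, c in l1:
--       if distances[r][c] is not None:
--         continue
--       distances[r][c] = dist
--       max_dist = max(max_dist, dist)
--       for dr, dc in [[0,1],[0,-1],[1,0],[-1,0]]:
--         r1, c1 = r+dr, c+dc
--         if r1 >= 0 and r1 < R and c1 >= 0 and c1 < C: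
--           l2.append((r1,c1))
--     if l2 != []:
--       l1, l2 = l2, []
--       dist += 1
--     else:
--       break
--   return distances, max_dist
-- ===== SOURCE B (Python) =====
-- def bfs(offices, R, C):
--   from collections import deque
--   distances = [[None for c in range(C)] for r in range(R)]
--   max_dist = 0
--   q = deque((r, c, 0) for r, c in offices)
--   while q:
--     r, c, d = q.popleft()
--     if distances[r][c] is not None:
--       continue
--     distances[r][c] = d
--     if d > max_dist:
--       max_dist = d
--     for r1, c1 in ((r, c + 1), (r, c - 1), (r + 1, c), (r - 1, c)):
--       if 0 <= r1 < R and 0 <= c1 < C: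
--         q.append((r1, c1, d + 1))
--   return distances, max_dist
-- ===== Notes on version B (the rewrite author's own statement) =====
-- stated objective: alternative
-- what changed: Replaces A's two swapped per-level frontier lists with a global level counter by a single FIFO queue (collections.deque) whose entries carry their own distance, marking each cell when it is popped.
import Mathlib
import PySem

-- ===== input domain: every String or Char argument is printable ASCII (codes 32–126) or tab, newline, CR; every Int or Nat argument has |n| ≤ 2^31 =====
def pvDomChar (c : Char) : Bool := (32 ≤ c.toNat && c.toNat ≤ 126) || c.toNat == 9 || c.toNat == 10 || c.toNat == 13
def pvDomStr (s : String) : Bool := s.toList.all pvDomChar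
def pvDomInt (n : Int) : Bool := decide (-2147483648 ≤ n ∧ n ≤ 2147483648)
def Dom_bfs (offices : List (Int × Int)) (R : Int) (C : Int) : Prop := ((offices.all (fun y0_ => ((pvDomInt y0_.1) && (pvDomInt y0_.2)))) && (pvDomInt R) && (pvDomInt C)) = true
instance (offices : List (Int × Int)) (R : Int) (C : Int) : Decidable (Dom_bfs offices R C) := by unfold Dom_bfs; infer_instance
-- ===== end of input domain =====

-- B replaces A's two swapped frontier lists with a level counter by a single FIFO queue whose
-- entries carry their own distance (objective: alternative decomposition, same asymptotic cost).

-- ===== PORT A =====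
-- shared grid helpers: distances[r][c] read / write with Python index semantics
def pvGet2 (dists : List (List (Option Int))) (r c : Int) : Option (Option Int) :=
  (PySem.List.pyGet? dists r).bind (fun row => PySem.List.pyGet? row c)

def pvSet2 (dists : List (List (Option Int))) (r c : Int) (v : Int) : List (List (Option Int)) :=
  ((PySem.List.pyGet? dists r).map
    (fun row => PySem.List.pySetD dists r (PySem.List.pySetD row c (some v)))).getD dists

-- number of still-unset cells (termination measure for both loops)
def pvNoneCount (dists : List (List (Option Int))) : Nat :=
  (dists.map (fun row => row.countP (fun o => o.isNone))).sum

-- [[None for c in range(C)] for r in range(R)]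
def pvInitGrid (R C : Int) : List (List (Option Int)) :=
  (PySem.List.pyRange 0 R 1).map (fun _ => (PySem.List.pyRange 0 C 1).map (fun _ => (none : Option Int)))

-- measure lemmas the ports' termination proofs cite (proofs of the program claims are below the claim block)
theorem pvSum_set (l : List Nat) (j : Nat) (v : Nat) (h : j < l.length) :
    (l.set j v).sum + l[j] = l.sum + v := by
  induction l generalizing j with
  | nil => simp at h
  | cons a t ih =>
    cases j with
    | zero => simp [List.set]; omega
    | succ k => simp [List.set]; have := ih k (by simpa using h); omega

theorem pvCountP_set_lt (row : List (Option Int)) (k : Nat) (v : Int) (hk : k < row.length)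
    (hx : row[k]? = some none) :
    (row.set k (some v)).countP (fun o => o.isNone) < row.countP (fun o => o.isNone) := by
  induction row generalizing k with
  | nil => simp at hk
  | cons a t ih =>
    cases k with
    | zero =>
      simp at hx; subst hx
      simp [List.set]
    | succ m =>
      have h2 := ih m (by simpa using hk) (by simpa using hx)
      simp only [List.set, List.countP_cons]
      exact Nat.add_lt_add_right h2 _

theorem pvGet_set {α : Type} (xs : List α) (i : Int) (x : α) (v : α)
    (h : PySem.List.pyGet? xs i = some x) :
    ∃ j : Nat, j < xs.length ∧ xs[j]? = some x ∧ PySem.List.pySetD xs i v = xs.set j v := by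
  unfold PySem.List.pyGet? PySem.List.pySetD PySem.List.pySet? PySem.List.pyIdx? at *
  split at h
  · split at h
    · exact ⟨i.toNat, by omega, by simpa using h, by simp_all⟩
    · simp at h
  · split at h
    · exact ⟨xs.length - (-i).toNat, by
        have := List.getElem?_eq_some_iff.mp (by simpa using h); omega,
        by simpa using h, by rename_i h1 h2; simp [h1, h2]⟩
    · simp at h

theorem pvNoneCount_set2_lt (dists : List (List (Option Int))) (r c v : Int)
    (h : pvGet2 dists r c = some none) :
    pvNoneCount (pvSet2 dists r c v) < pvNoneCount dists := by
  rcases hrow : PySem.List.pyGet? dists r with _ | row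
  · simp [pvGet2, hrow] at h
  · simp only [pvGet2, hrow, Option.bind_some] at h
    obtain ⟨k, hk, hkx, hset⟩ := pvGet_set row c none (some v) h
    obtain ⟨j, hj, hjx, hset2⟩ := pvGet_set dists r row (PySem.List.pySetD row c (some v)) hrow
    simp only [pvSet2, hrow, Option.map_some, Option.getD_some]
    rw [hset2, hset]
    unfold pvNoneCount
    rw [List.map_set]
    have hsum := pvSum_set (dists.map (fun row => row.countP (fun o => o.isNone)))
      j ((row.set k (some v)).countP (fun o => o.isNone)) (by simpa using hj)
    have hdj : dists[j] = row := (List.getElem?_eq_some_iff.mp hjx).2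
    simp only [List.getElem_map, hdj] at hsum
    have := pvCountP_set_lt row k v hk hkx
    omega

-- neighbours appended in A's order [0,1],[0,-1],[1,0],[-1,0], kept only if inside the grid
def pvNbrs (R C r c : Int) : List (Int × Int) :=
  [(r, c + 1), (r, c - 1), (r + 1, c), (r - 1, c)].filter
    (fun p => decide (0 ≤ p.1) && decide (p.1 < R) && decide (0 ≤ p.2) && decide (p.2 < C))

-- the body of A's `for r, c in l1` loop: walks l1, marking cells and appending neighbours to l2
def pvInnerA (R C dist : Int) :
    List (List (Option Int)) → Int → List (Int × Int) → List (Int × Int) →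
    (List (List (Option Int)) × Int × List (Int × Int))
  | dists, maxd, [], l2 => (dists, maxd, l2)
  | dists, maxd, (r, c) :: rest, l2 =>
    -- `if distances[r][c] is not None: continue` — the guard negated selects the marking branch
    if pvGet2 dists r c = some none then
      pvInnerA R C dist (pvSet2 dists r c dist) (max maxd dist) rest (l2 ++ pvNbrs R C r c)
    else
      pvInnerA R C dist dists maxd rest l2

theorem pvInnerA_nc (R C dist : Int) (l1 : List (Int × Int)) :
    ∀ (dists : List (List (Option Int))) (maxd : Int) (l2 : List (Int × Int)),
      pvNoneCount (pvInnerA R C dist dists maxd l1 l2).1 ≤ pvNoneCount dists ∧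
      ((pvInnerA R C dist dists maxd l1 l2).2.2 ≠ l2 →
        pvNoneCount (pvInnerA R C dist dists maxd l1 l2).1 < pvNoneCount dists) := by
  induction l1 with
  | nil => intro dists maxd l2; exact ⟨le_refl _, by intro h; simp [pvInnerA] at h⟩
  | cons p rest ih =>
    intro dists maxd l2
    obtain ⟨r, c⟩ := p
    by_cases h : pvGet2 dists r c = some none
    · have hlt := pvNoneCount_set2_lt dists r c dist h
      have := ih (pvSet2 dists r c dist) (max maxd dist) (l2 ++ pvNbrs R C r c)
      simp only [pvInnerA, h, if_pos]
      exact ⟨by omega, fun _ => by omega⟩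
    · simpa only [pvInnerA, h, if_neg, if_false] using ih dists maxd l2

-- A's `while True` loop: process level l1 at distance dist, then swap in l2
def pvLoopA (R C : Int) :
    List (List (Option Int)) → Int → List (Int × Int) → Int → (List (List (Option Int)) × Int)
  | dists, maxd, l1, dist =>
    let t := pvInnerA R C dist dists maxd l1 []
    if h : t.2.2 = [] then (t.1, t.2.1)
    else pvLoopA R C t.1 t.2.1 t.2.2 (dist + 1)
  termination_by dists _ _ _ => pvNoneCount dists
  decreasing_by exact (pvInnerA_nc R C dist l1 dists maxd []).2 h

def bfs (offices : List (Int × Int)) (R : Int) (C : Int) : List (List (Option Int)) × Int :=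
  pvLoopA R C (pvInitGrid R C) 0 offices 0

-- ===== PORT B =====
-- single FIFO queue of (r, c, d) triples; a cell is marked with its own distance when popped
def pvLoopB (R C : Int) :
    List (List (Option Int)) → Int → List (Int × Int × Int) → (List (List (Option Int)) × Int)
  | dists, maxd, [] => (dists, maxd)
  | dists, maxd, (r, c, d) :: rest =>
    -- `if distances[r][c] is not None: continue` — the guard negated selects the marking branch
    if h : pvGet2 dists r c = some none then
      pvLoopB R C (pvSet2 dists r c d) (if d > maxd then d else maxd)
        (rest ++ [(r, c + 1), (r, c - 1), (r + 1, c), (r - 1, c)].filterMap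
          (fun p => if 0 ≤ p.1 ∧ p.1 < R ∧ 0 ≤ p.2 ∧ p.2 < C then some (p.1, p.2, d + 1) else none))
    else pvLoopB R C dists maxd rest
  termination_by dists _ q => 4 * pvNoneCount dists + q.length
  decreasing_by
  · have h1 := pvNoneCount_set2_lt dists r c d h
    have h2 := List.length_filterMap_le
        (fun p : Int × Int => if h : 0 ≤ p.1 ∧ p.1 < R ∧ 0 ≤ p.2 ∧ p.2 < C
          then some (p.1, p.2, d + 1) else none)
        [(r, c + 1), (r, c - 1), (r + 1, c), (r - 1, c)]
    simp only [List.length_append, List.length_cons, List.length_nil] at *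
    omega
  · simp only [List.length_cons]; omega

def bfs_alt (offices : List (Int × Int)) (R : Int) (C : Int) : List (List (Option Int)) × Int :=
  pvLoopB R C (pvInitGrid R C) 0 (offices.map (fun p => (p.1, p.2, 0)))

-- ===== PRECONDITION & SPEC =====
-- Pre_ excludes exactly the inputs on which A raises IndexError: an office outside the Python
-- index range of the R×C grid (so in particular any office at all when R ≤ 0 or C ≤ 0).
def Pre_bfs (offices : List (Int × Int)) (R : Int) (C : Int) : Prop :=
  ∀ p ∈ offices, -R ≤ p.1 ∧ p.1 < R ∧ -C ≤ p.2 ∧ p.2 < C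
instance (offices : List (Int × Int)) (R : Int) (C : Int) : Decidable (Pre_bfs offices R C) := by
  unfold Pre_bfs; infer_instance

def pvWitness_bfs : (List (Int × Int)) × Int × Int := ([(0, 0), (2, 1)], 3, 2)

def Spec_bfs (offices : List (Int × Int)) (R : Int) (C : Int) (out : List (List (Option Int)) × Int) : Prop := out = bfs_alt offices R C
instance (offices : List (Int × Int)) (R : Int) (C : Int) (out : List (List (Option Int)) × Int) : Decidable (Spec_bfs offices R C out) := by unfold Spec_bfs; infer_instance

-- ===== CLAIM (what is proved, stated in full; the proofs are below) =====
def Claim_equal_bfs : Prop := ∀ (offices : List (Int × Int)) (R : Int) (C : Int), Dom_bfs offices R C → Pre_bfs offices R C → Spec_bfs offices R C (bfs offices R C)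

-- ===== LEMMAS AND PROOFS =====

-- A's loop body as seen mid-level: l1 still to process at distance dist, l2 already collected
def pvLoopAaux (R C : Int) (dists : List (List (Option Int))) (maxd : Int)
    (l1 l2 : List (Int × Int)) (dist : Int) : List (List (Option Int)) × Int :=
  let t := pvInnerA R C dist dists maxd l1 l2
  if t.2.2 = [] then (t.1, t.2.1) else pvLoopA R C t.1 t.2.1 t.2.2 (dist + 1)

theorem pvLoopA_eq (R C : Int) (dists : List (List (Option Int))) (maxd : Int)
    (l1 : List (Int × Int)) (dist : Int) :
    pvLoopA R C dists maxd l1 dist = pvLoopAaux R C dists maxd l1 [] dist := by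
  rw [pvLoopA]; rfl

-- B's filterMap over offsets equals A's filter-then-tag neighbour list
theorem pvFilterMap_filter {α β : Type} (P : α → Prop) [DecidablePred P] (g : α → β) (l : List α) :
    l.filterMap (fun x => if P x then some (g x) else none)
      = (l.filter (fun x => decide (P x))).map g := by
  induction l with
  | nil => rfl
  | cons a t ih => by_cases h : P a <;> simp [h, ih]

theorem pvNbrs_filterMap (R C r c d : Int) :
    ([(r, c + 1), (r, c - 1), (r + 1, c), (r - 1, c)].filterMap
      (fun p : Int × Int => if 0 ≤ p.1 ∧ p.1 < R ∧ 0 ≤ p.2 ∧ p.2 < C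
        then some (p.1, p.2, d) else none))
    = (pvNbrs R C r c).map (fun p => (p.1, p.2, d)) := by
  rw [pvFilterMap_filter (fun p : Int × Int => 0 ≤ p.1 ∧ p.1 < R ∧ 0 ≤ p.2 ∧ p.2 < C)
    (fun p => (p.1, p.2, d))]
  unfold pvNbrs
  congr 1
  apply List.filter_congr
  intro p _
  simp [Bool.and_assoc]

theorem pvMax_if (a b : Int) : (if b > a then b else a) = max a b := by
  rcases le_or_gt b a with h | h <;> simp [max_def] <;> omega

-- the simulation: B's queue is A's remaining level l1 tagged dist followed by A's next level l2 tagged dist+1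
theorem pvKey (R C : Int) :
    ∀ (n1 : Nat) (dists : List (List (Option Int))), pvNoneCount dists ≤ n1 →
    ∀ (n2 : Nat) (l2 : List (Int × Int)), l2.length ≤ n2 →
    ∀ (l1 : List (Int × Int)) (maxd dist : Int),
      pvLoopB R C dists maxd
        (l1.map (fun p => (p.1, p.2, dist)) ++ l2.map (fun p => (p.1, p.2, dist + 1)))
      = pvLoopAaux R C dists maxd l1 l2 dist := by
  intro n1
  induction n1 using Nat.strong_induction_on with
  | _ n1 H1 =>
    intro dists hd n2
    induction n2 using Nat.strong_induction_on with
    | _ n2 H2 =>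
      intro l2 hl2 l1
      induction l1 with
      | nil =>
        intro maxd dist
        simp only [List.map_nil, List.nil_append, pvLoopAaux, pvInnerA]
        by_cases h : l2 = []
        · subst h; simp [pvLoopB]
        · rw [if_neg h, pvLoopA_eq]
          have := H2 (l2.length - 1) (by
            have : l2.length ≠ 0 := by simpa using h
            omega) [] (by simp) l2 maxd (dist + 1)
          simpa using this
      | cons p rest ih =>
        intro maxd dist
        obtain ⟨r, c⟩ := p
        have hA : pvLoopAaux R C dists maxd ((r, c) :: rest) l2 dist
            = if pvGet2 dists r c = some none
              then pvLoopAaux R C (pvSet2 dists r c dist) (max maxd dist) rest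
                (l2 ++ pvNbrs R C r c) dist
              else pvLoopAaux R C dists maxd rest l2 dist := by
          simp only [pvLoopAaux, pvInnerA]
          split <;> rfl
        by_cases h : pvGet2 dists r c = some none
        · -- mark: both sides set the cell and append its neighbours
          rw [List.map_cons, List.cons_append, pvLoopB, dif_pos h,
            List.append_assoc, pvNbrs_filterMap R C r c (dist + 1), ← List.map_append,
            pvMax_if maxd dist]
          have hlt := pvNoneCount_set2_lt dists r c dist h
          rw [H1 (pvNoneCount (pvSet2 dists r c dist)) (by omega) _ (le_refl _)
            ((l2 ++ pvNbrs R C r c).length) _ (le_refl _) rest (max maxd dist) dist]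
          rw [hA, if_pos h]
        · -- already set: both sides skip the cell
          rw [List.map_cons, List.cons_append, pvLoopB, dif_neg h, ih, hA, if_neg h]

-- ===== VERDICT (by name: the statement is the Claim_ definition above) =====
theorem bfs_spec : Claim_equal_bfs := by
  intro offices R C _ _
  unfold Spec_bfs bfs bfs_alt
  have := pvKey R C (pvNoneCount (pvInitGrid R C)) (pvInitGrid R C) (le_refl _)
    0 [] (by simp) offices 0 0
  rw [pvLoopA_eq]
  simpa using this.symm
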